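-- pv_equiv track=rewrite | github.com/epeden/soduko-thing | board.py | build_columns_from_cells
-- ===== SOURCE A (Python) =====
-- def build_columns_from_cells(cells):
-- 	columns = []
-- 	for i in range(9):
-- 		column = []
-- 		this_column = cells[i::9]
-- 		for c in this_column:
-- 			column.append(c)
-- 		columns.append(column)
-- 	return columns
-- ===== SOURCE B (Python) =====
-- def build_columns_from_cells(cells):
-- 	columns = [[] for _ in range(9)]
-- 	for idx, c in enumerate(cells):
-- 		columns[idx % 9].append(c)
-- 	return columns
-- ===== Notes on version B (the rewrite author's own statement) =====
-- stated objective: simpler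
-- what changed: Replaces A's nine strided-slice gathers (cells[i::9] per column) with a single enumerate pass that scatters each cell into columns[idx % 9].
import Mathlib
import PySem

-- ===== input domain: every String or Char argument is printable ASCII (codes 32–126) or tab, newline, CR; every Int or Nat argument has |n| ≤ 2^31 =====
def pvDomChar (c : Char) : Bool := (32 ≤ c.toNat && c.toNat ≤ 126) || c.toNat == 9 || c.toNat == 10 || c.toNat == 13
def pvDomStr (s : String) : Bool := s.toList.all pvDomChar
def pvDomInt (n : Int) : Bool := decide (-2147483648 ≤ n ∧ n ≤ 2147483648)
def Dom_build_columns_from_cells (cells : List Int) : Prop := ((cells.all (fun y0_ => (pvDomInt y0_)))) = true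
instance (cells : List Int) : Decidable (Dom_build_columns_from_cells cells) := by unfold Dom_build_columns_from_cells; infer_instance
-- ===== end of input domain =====

-- B reorganizes the cells into 9 columns in one enumerate pass (scatter by idx % 9) instead of A's nine strided slices; objective: simpler.

-- ===== PORT A =====
-- for i in range(9): column = []; for c in cells[i::9]: column.append(c); columns.append(column)
def build_columns_from_cells (cells : List Int) : List (List Int) :=
  (PySem.List.pyRange 0 9 1).foldl (fun columns i =>
    let column : List Int := []
    let this_column := (PySem.List.slice? cells (some i) none 9).getD []
    let column := this_column.foldl (fun col c => col ++ [c]) column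
    columns ++ [column]) []

-- ===== PORT B =====
-- columns = [[] for _ in range(9)]; for idx, c in enumerate(cells): columns[idx % 9].append(c)
def build_columns_from_cells_alt (cells : List Int) : List (List Int) :=
  (PySem.List.enumerate cells 0).foldl
    (fun columns p => columns.modify (PySem.Int.mod p.1 9).toNat (fun col => col ++ [p.2]))
    (List.replicate 9 [])

-- ===== PRECONDITION & SPEC =====
def Spec_build_columns_from_cells (cells : List Int) (out : List (List Int)) : Prop := out = build_columns_from_cells_alt cells
instance (cells : List Int) (out : List (List Int)) : Decidable (Spec_build_columns_from_cells cells out) := by unfold Spec_build_columns_from_cells; infer_instance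

-- ===== CLAIM (what is proved, stated in full; the proofs are below) =====
def Claim_equal_build_columns_from_cells : Prop := ∀ (cells : List Int), Dom_build_columns_from_cells cells → Spec_build_columns_from_cells cells (build_columns_from_cells cells)

-- ===== LEMMAS AND PROOFS =====

-- the column gathered by stride 9 starting at index i (A's cells[i::9])
def colA (xs : List Int) (i : ℕ) : List Int :=
  (List.range xs.length).filterMap (fun k => xs[i + 9 * k]?)

-- column j as collected by B's scatter when the first element has global index t
def colB (t : ℕ) (xs : List Int) (j : ℕ) : List Int :=
  (List.range xs.length).filterMap (fun k => if (t + k) % 9 = j then xs[k]? else none)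

theorem filterMap_range_stable {α : Type} (f : ℕ → Option α) (c N : ℕ) (hcN : c ≤ N)
    (h : ∀ k, c ≤ k → f k = none) :
    List.filterMap f (List.range N) = List.filterMap f (List.range c) := by
  obtain ⟨d, rfl⟩ := Nat.exists_eq_add_of_le hcN
  rw [List.range_add, List.filterMap_append, List.filterMap_map]
  have : List.filterMap (f ∘ fun x => c + x) (List.range d) = [] := by
    apply List.filterMap_eq_nil_iff.mpr
    intro a ha
    exact h _ (Nat.le_add_right _ _)
  rw [this, List.append_nil]

theorem hidx (xs : List Int) (i : ℕ) :
    PySem.List.sliceIndices xs.length (some (i : ℤ)) none 9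
      = (min (i:ℤ) xs.length, (xs.length:ℤ), 9) := by
  simp [PySem.List.sliceIndices]

theorem sliceA (xs : List Int) (i : ℕ) :
    PySem.List.slice? xs (some (i : ℤ)) none 9 = some (colA xs i) := by
  rw [PySem.List.slice?, hidx]
  norm_num
  by_cases hin : i < xs.length
  · have hmin : min (i:ℤ) (xs.length:ℤ) = (i:ℤ) := min_eq_left (by exact_mod_cast hin.le)
    have hcast : ((xs.length:ℤ) - (i:ℤ) + 9 - 1) = (((xs.length - i + 8 : ℕ)) : ℤ) := by
      push_cast [Nat.sub_add_comm hin.le]; omega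
    have hcnt : (((xs.length - i + 8 : ℕ) : ℤ) / 9).toNat = (xs.length - i + 8) / 9 := by omega
    rw [if_pos hin, hmin, hcast, hcnt]
    have hfun : (fun k : ℕ => xs[((i:ℤ) + 9 * (k:ℤ)).toNat]?) = fun k : ℕ => xs[i + 9 * k]? := by
      funext k
      congr 1
    rw [hfun, colA, filterMap_range_stable _ ((xs.length - i + 8) / 9) xs.length (by omega)]
    intro k hk
    exact List.getElem?_eq_none (by omega)
  · rw [if_neg hin]
    simp only [List.range_zero, List.filterMap_nil, colA]
    symm
    simp only [List.filterMap_eq_nil_iff]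
    intro a ha
    exact List.getElem?_eq_none (by omega)

theorem colB_stable (t : ℕ) (xs : List Int) (j : ℕ) (N : ℕ) (hN : xs.length ≤ N) :
    List.filterMap (fun k => if (t + k) % 9 = j then xs[k]? else none) (List.range N) = colB t xs j := by
  unfold colB
  rw [filterMap_range_stable _ xs.length N hN]
  intro k hk
  rw [List.getElem?_eq_none (by omega)]
  split <;> rfl

theorem colA_drop (xs : List Int) (i : ℕ) (hxs : xs ≠ []) :
    colA xs i = xs[i]?.toList ++ colA (xs.drop 9) i := by
  have hn : xs.length = (xs.length - 1) + 1 := by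
    have := List.length_pos_iff.mpr hxs; omega
  rw [colA, hn, List.range_succ_eq_map, List.filterMap_cons, List.filterMap_map]
  have hfun : ((fun k => xs[i + 9 * k]?) ∘ Nat.succ)
      = fun k : ℕ => (xs.drop 9)[i + 9 * k]? := by
    funext k
    simp only [Function.comp, List.getElem?_drop]
    congr 1
    omega
  rw [hfun, filterMap_range_stable _ (xs.drop 9).length _ (by simp; omega)
    (fun k hk => List.getElem?_eq_none (by omega))]
  cases h : xs[i + 9 * 0]? with
  | none => simp [colA] at h ⊢
  | some a => simp [colA] at h ⊢

theorem colB_head (xs : List Int) (i : ℕ) (hi : i < 9) :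
    (List.range 9).filterMap (fun k => if k % 9 = i then xs[k]? else none) = xs[i]?.toList := by
  interval_cases i <;>
    simp [List.range_succ, List.filterMap_cons, Option.toList] <;> rfl

theorem colB_drop (xs : List Int) (i : ℕ) (hi : i < 9) (_hxs : xs ≠ []) :
    colB 0 xs i = xs[i]?.toList ++ colB 0 (xs.drop 9) i := by
  have hstab := colB_stable 0 xs i (9 + xs.length) (by omega)
  rw [← hstab, List.range_add, List.filterMap_append, List.filterMap_map]
  congr 1
  · simp only [Nat.zero_add]
    exact colB_head xs i hi
  · have hfun : ((fun k => if (0 + k) % 9 = i then xs[k]? else none) ∘ fun x => 9 + x)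
        = fun k : ℕ => if (0 + k) % 9 = i then (xs.drop 9)[k]? else none := by
      funext k
      simp only [Function.comp, Nat.zero_add, Nat.add_mod_left, List.getElem?_drop]
    rw [hfun, colB_stable 0 (xs.drop 9) i xs.length (by simp)]

theorem colA_eq_colB (xs : List Int) (i : ℕ) (hi : i < 9) : colA xs i = colB 0 xs i := by
  cases xs with
  | nil => simp [colA, colB]
  | cons x rest =>
    rw [colA_drop _ _ (by simp), colB_drop _ _ hi (by simp),
      colA_eq_colB ((x :: rest).drop 9) i hi]
termination_by xs.length
decreasing_by simp

theorem foldl_append_singleton (l acc : List Int) :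
    l.foldl (fun col c => col ++ [c]) acc = acc ++ l := by
  induction l generalizing acc with
  | nil => simp
  | cons x xs ih => simp [List.foldl, ih, List.append_assoc]

theorem colB_cons (t : ℕ) (x : Int) (xs : List Int) (j : ℕ) :
    colB t (x :: xs) j = (if t % 9 = j then [x] else []) ++ colB (t + 1) xs j := by
  unfold colB
  rw [List.length_cons, List.range_succ_eq_map, List.filterMap_cons, List.filterMap_map]
  have : (fun k => if (t + k) % 9 = j then (x :: xs)[k]? else none) ∘ Nat.succ
       = fun k => if ((t+1) + k) % 9 = j then xs[k]? else none := by
    funext k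
    simp [Function.comp]
    ring_nf
  rw [this]
  split <;> simp_all

theorem B_inv (xs : List Int) (t : ℕ) (c0 c1 c2 c3 c4 c5 c6 c7 c8 : List Int) :
    (PySem.List.enumerate xs (t : ℤ)).foldl
      (fun columns p => columns.modify (PySem.Int.mod p.1 9).toNat (fun col => col ++ [p.2]))
      [c0, c1, c2, c3, c4, c5, c6, c7, c8]
    = [c0 ++ colB t xs 0, c1 ++ colB t xs 1, c2 ++ colB t xs 2, c3 ++ colB t xs 3,
       c4 ++ colB t xs 4, c5 ++ colB t xs 5, c6 ++ colB t xs 6, c7 ++ colB t xs 7,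
       c8 ++ colB t xs 8] := by
  induction xs generalizing t c0 c1 c2 c3 c4 c5 c6 c7 c8 with
  | nil => simp [PySem.List.enumerate_nil, colB]
  | cons x rest ih =>
    rw [PySem.List.enumerate_cons, List.foldl_cons]
    have hm : (PySem.Int.mod (t:ℤ) 9).toNat = t % 9 := by
      unfold PySem.Int.mod
      rw [Int.fmod_eq_emod]
      simp
      omega
    have hc : ((t:ℤ) + 1) = (((t+1 : ℕ)) : ℤ) := by push_cast; ring
    rw [hm, hc]
    have hcase : t % 9 = 0 ∨ t % 9 = 1 ∨ t % 9 = 2 ∨ t % 9 = 3 ∨ t % 9 = 4 ∨ t % 9 = 5 ∨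
        t % 9 = 6 ∨ t % 9 = 7 ∨ t % 9 = 8 := by omega
    rcases hcase with h|h|h|h|h|h|h|h|h
    · rw [h]
      show List.foldl (fun columns p => columns.modify (PySem.Int.mod p.1 9).toNat fun col => col ++ [p.2]) [c0 ++ [x], c1, c2, c3, c4, c5, c6, c7, c8] (PySem.List.enumerate rest ((t + 1 : ℕ) : ℤ)) = _
      rw [ih]
      simp [colB_cons, h, List.append_assoc]
    · rw [h]
      show List.foldl (fun columns p => columns.modify (PySem.Int.mod p.1 9).toNat fun col => col ++ [p.2]) [c0, c1 ++ [x], c2, c3, c4, c5, c6, c7, c8] (PySem.List.enumerate rest ((t + 1 : ℕ) : ℤ)) = _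
      rw [ih]
      simp [colB_cons, h, List.append_assoc]
    · rw [h]
      show List.foldl (fun columns p => columns.modify (PySem.Int.mod p.1 9).toNat fun col => col ++ [p.2]) [c0, c1, c2 ++ [x], c3, c4, c5, c6, c7, c8] (PySem.List.enumerate rest ((t + 1 : ℕ) : ℤ)) = _
      rw [ih]
      simp [colB_cons, h, List.append_assoc]
    · rw [h]
      show List.foldl (fun columns p => columns.modify (PySem.Int.mod p.1 9).toNat fun col => col ++ [p.2]) [c0, c1, c2, c3 ++ [x], c4, c5, c6, c7, c8] (PySem.List.enumerate rest ((t + 1 : ℕ) : ℤ)) = _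
      rw [ih]
      simp [colB_cons, h, List.append_assoc]
    · rw [h]
      show List.foldl (fun columns p => columns.modify (PySem.Int.mod p.1 9).toNat fun col => col ++ [p.2]) [c0, c1, c2, c3, c4 ++ [x], c5, c6, c7, c8] (PySem.List.enumerate rest ((t + 1 : ℕ) : ℤ)) = _
      rw [ih]
      simp [colB_cons, h, List.append_assoc]
    · rw [h]
      show List.foldl (fun columns p => columns.modify (PySem.Int.mod p.1 9).toNat fun col => col ++ [p.2]) [c0, c1, c2, c3, c4, c5 ++ [x], c6, c7, c8] (PySem.List.enumerate rest ((t + 1 : ℕ) : ℤ)) = _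
      rw [ih]
      simp [colB_cons, h, List.append_assoc]
    · rw [h]
      show List.foldl (fun columns p => columns.modify (PySem.Int.mod p.1 9).toNat fun col => col ++ [p.2]) [c0, c1, c2, c3, c4, c5, c6 ++ [x], c7, c8] (PySem.List.enumerate rest ((t + 1 : ℕ) : ℤ)) = _
      rw [ih]
      simp [colB_cons, h, List.append_assoc]
    · rw [h]
      show List.foldl (fun columns p => columns.modify (PySem.Int.mod p.1 9).toNat fun col => col ++ [p.2]) [c0, c1, c2, c3, c4, c5, c6, c7 ++ [x], c8] (PySem.List.enumerate rest ((t + 1 : ℕ) : ℤ)) = _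
      rw [ih]
      simp [colB_cons, h, List.append_assoc]
    · rw [h]
      show List.foldl (fun columns p => columns.modify (PySem.Int.mod p.1 9).toNat fun col => col ++ [p.2]) [c0, c1, c2, c3, c4, c5, c6, c7, c8 ++ [x]] (PySem.List.enumerate rest ((t + 1 : ℕ) : ℤ)) = _
      rw [ih]
      simp [colB_cons, h, List.append_assoc]

-- ===== VERDICT (by name: the statement is the Claim_ definition above) =====
theorem build_columns_from_cells_spec : Claim_equal_build_columns_from_cells := by
  intro cells _
  unfold Spec_build_columns_from_cells build_columns_from_cells build_columns_from_cells_alt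
  have hB := B_inv cells 0 [] [] [] [] [] [] [] [] []
  simp only [Nat.cast_zero] at hB
  rw [show (List.replicate 9 ([] : List Int)) = [[],[],[],[],[],[],[],[],[]] from rfl, hB]
  have h0 := sliceA cells 0; have h1 := sliceA cells 1; have h2 := sliceA cells 2
  have h3 := sliceA cells 3; have h4 := sliceA cells 4; have h5 := sliceA cells 5
  have h6 := sliceA cells 6; have h7 := sliceA cells 7; have h8 := sliceA cells 8
  norm_num at h0 h1 h2 h3 h4 h5 h6 h7 h8
  rw [show PySem.List.pyRange 0 9 1 = [0,1,2,3,4,5,6,7,8] from by decide]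
  simp only [List.foldl, h0, h1, h2, h3, h4, h5, h6, h7, h8, Option.getD_some,
    foldl_append_singleton, List.nil_append]
  simp [colA_eq_colB]
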